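-- pv_equiv track=rewrite | github.com/tuanvubku/Assignment_AI_course | assignment1.py | intialState
-- ===== SOURCE A (Python) =====
-- def intialState(n, k):
--     matches = []
--     if n*k % 2 == 1:
--         return None
--     for i in range(n):
--         temp = []
--         for j in range(1, k//2 + 1):
--             temp.append((i + j) % n)
--             temp.append((i - j) % n)
--         if k % 2 == 1:
--             temp.append((i + (n // 2) + 1) % n)
--         matches.append(temp)
--     return matches
-- ===== SOURCE B (Python) =====
-- def intialState(n, k):
--     if n * k % 2 == 1:
--         return None
--     if n <= 0:
--         return []
--     cols = []
--     for j in range(1, k // 2 + 1):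
--         cols.append([(i + j) % n for i in range(n)])
--         cols.append([(i - j) % n for i in range(n)])
--     if k % 2 == 1:
--         cols.append([(i + n // 2 + 1) % n for i in range(n)])
--     return [[col[i] for col in cols] for i in range(n)]
-- ===== Notes on version B (the rewrite author's own statement) =====
-- stated objective: alternative
-- what changed: B builds the schedule column-wise -- one full column per opponent slot over all players -- and then transposes by indexing, instead of A's row-wise construction that rebuilds every row by a nested append loop.
import Mathlib
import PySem

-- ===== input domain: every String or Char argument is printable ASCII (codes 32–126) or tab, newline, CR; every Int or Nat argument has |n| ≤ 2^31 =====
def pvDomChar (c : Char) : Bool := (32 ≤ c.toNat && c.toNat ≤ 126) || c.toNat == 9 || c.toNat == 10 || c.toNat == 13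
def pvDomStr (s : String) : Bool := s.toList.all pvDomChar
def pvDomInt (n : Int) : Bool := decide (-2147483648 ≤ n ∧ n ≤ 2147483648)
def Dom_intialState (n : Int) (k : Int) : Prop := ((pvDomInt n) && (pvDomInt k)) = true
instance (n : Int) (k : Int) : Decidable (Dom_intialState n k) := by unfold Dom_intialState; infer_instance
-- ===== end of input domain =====

-- B builds the schedule column-wise (one column per opponent slot) and transposes by indexing, instead of A's row-wise nested append loop (objective: alternative, same cost).
-- ===== PORT A =====
def intialState (n : Int) (k : Int) : Option (List (List Int)) :=
  if PySem.Int.mod (n * k) 2 == 1 then none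
  else
    some ((PySem.List.pyRange 0 n 1).foldl (fun rows i =>
      let temp := (PySem.List.pyRange 1 (PySem.Int.floordiv k 2 + 1) 1).foldl
        (fun temp j => temp ++ [PySem.Int.mod (i + j) n] ++ [PySem.Int.mod (i - j) n]) []
      let temp := if PySem.Int.mod k 2 == 1
        then temp ++ [PySem.Int.mod (i + PySem.Int.floordiv n 2 + 1) n] else temp
      rows ++ [temp]) [])

-- ===== PORT B =====
-- B: build one column per opponent slot over all players, then transpose by indexing.
-- col[i] in Source B is always in range (i ∈ range(n), every column has length n); pyGetD only totalises it.
def intialState_alt (n : Int) (k : Int) : Option (List (List Int)) :=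
  if PySem.Int.mod (n * k) 2 == 1 then none
  else if n ≤ 0 then some []
  else
    let cols := (PySem.List.pyRange 1 (PySem.Int.floordiv k 2 + 1) 1).foldl
      (fun cols j =>
        cols ++ [(PySem.List.pyRange 0 n 1).map (fun i => PySem.Int.mod (i + j) n)]
             ++ [(PySem.List.pyRange 0 n 1).map (fun i => PySem.Int.mod (i - j) n)]) []
    let cols := if PySem.Int.mod k 2 == 1
      then cols ++ [(PySem.List.pyRange 0 n 1).map
              (fun i => PySem.Int.mod (i + PySem.Int.floordiv n 2 + 1) n)]
      else cols
    some ((PySem.List.pyRange 0 n 1).map (fun i =>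
      cols.map (fun col => PySem.List.pyGetD col i 0)))

-- ===== PRECONDITION & SPEC =====

def Spec_intialState (n : Int) (k : Int) (out : Option (List (List Int))) : Prop := out = intialState_alt n k
instance (n : Int) (k : Int) (out : Option (List (List Int))) : Decidable (Spec_intialState n k out) := by unfold Spec_intialState; infer_instance

-- ===== CLAIM =====
def Claim_equal_intialState : Prop := ∀ (n : Int) (k : Int), Dom_intialState n k → Spec_intialState n k (intialState n k)

-- ===== LEMMAS AND PROOFS =====
-- a foldl that appends two singletons per step is a flatMap of pairs
theorem pvFoldlPair {α β : Type} (l : List α) (f g : α → β) (acc : List β) :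
    l.foldl (fun t j => t ++ [f j] ++ [g j]) acc
      = acc ++ l.flatMap (fun j => [f j, g j]) := by
  induction l generalizing acc with
  | nil => simp
  | cons x xs ih => simp [List.flatMap_def]

-- indexing a pyRange-comprehension column at i ∈ [0, n) yields the generator at i
theorem pvColGet (n i : Int) (f : Int → Int) (h0 : 0 ≤ i) (h1 : i < n) :
    PySem.List.pyGetD ((PySem.List.pyRange 0 n 1).map f) i 0 = f i := by
  exact PySem.List.pyGetD_map_pyRange_of_nonneg f n i 0 h0 h1

-- ===== VERDICT =====
theorem intialState_spec : Claim_equal_intialState := by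
  intro n k _
  unfold Spec_intialState intialState intialState_alt
  split
  · rfl
  by_cases hn : n ≤ 0
  · simp [hn, PySem.List.pyRange_one_eq_nil hn]
  simp only [hn, if_false]
  congr 1
  rw [PySem.List.foldl_append_singleton_eq_map, pvFoldlPair]
  simp only [List.nil_append]
  apply List.map_congr_left
  intro i hi
  rw [PySem.List.mem_pyRange_one] at hi
  rw [pvFoldlPair]
  simp only [List.nil_append]
  split_ifs with hk
  · rw [List.map_append, List.map_flatMap]
    congr 1
    · apply List.flatMap_congr
      intro j _
      simp [pvColGet n i _ hi.1 hi.2]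
    · simp [pvColGet n i _ hi.1 hi.2]
  · rw [List.map_flatMap]
    apply List.flatMap_congr
    intro j _
    simp [pvColGet n i _ hi.1 hi.2]
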